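-- pv_equiv track=rewrite | github.com/jebi-mau/pipeline-one | worker/tasks/orchestrator.py | validate_stage_dependencies
-- ===== SOURCE A (Python) =====
-- ALL_STAGES = ["extraction", "segmentation", "reconstruction", "tracking"]
--
-- def validate_stage_dependencies(stages_to_run: list[str]) -> list[str]:
--     """
--     Validate and add required dependencies for selected stages.
--
--     Stage dependencies:
--     - segmentation requires extraction
--     - reconstruction requires segmentation
--     - tracking requires reconstruction
--
--     Args:
--         stages_to_run: List of requested stages
--
--     Returns:
--         Validated list with all required dependencies
--     """
--     validated = set(stages_to_run)
--
--     # Check dependencies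
--     if "tracking" in validated:
--         validated.add("reconstruction")
--     if "reconstruction" in validated:
--         validated.add("segmentation")
--     if "segmentation" in validated:
--         validated.add("extraction")
--
--     # Return in proper order
--     return [s for s in ALL_STAGES if s in validated]
-- ===== SOURCE B (Python) =====
-- ALL_STAGES = ["extraction", "segmentation", "reconstruction", "tracking"]
--
-- def validate_stage_dependencies(stages_to_run: list[str]) -> list[str]:
--     idx = -1
--     for s in stages_to_run:
--         if s in ALL_STAGES:
--             idx = max(idx, ALL_STAGES.index(s))
--     return ALL_STAGES[:idx + 1]
-- ===== Notes on version B (the rewrite author's own statement) =====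
-- stated objective: simpler
-- what changed: Replaces the set-building and three cascading conditional dependency adds with a single pass computing the maximum ALL_STAGES index among the requested stages, returning that prefix of ALL_STAGES.
import Mathlib
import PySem

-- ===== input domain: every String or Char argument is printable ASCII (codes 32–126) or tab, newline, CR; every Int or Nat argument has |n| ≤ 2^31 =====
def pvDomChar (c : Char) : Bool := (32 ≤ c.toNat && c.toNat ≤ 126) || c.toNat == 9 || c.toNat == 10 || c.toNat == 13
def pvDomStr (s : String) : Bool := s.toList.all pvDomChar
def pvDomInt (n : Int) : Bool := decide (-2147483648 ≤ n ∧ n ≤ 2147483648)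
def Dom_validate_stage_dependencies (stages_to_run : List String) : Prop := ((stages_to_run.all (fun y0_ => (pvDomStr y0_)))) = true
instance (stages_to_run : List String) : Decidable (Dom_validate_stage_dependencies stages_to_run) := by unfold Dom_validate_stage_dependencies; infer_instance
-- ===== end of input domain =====

-- B builds the dependency closure as a single prefix of ALL_STAGES (max index pass) instead of A's set with cascading conditional adds.

def ALL_STAGES : List String := ["extraction", "segmentation", "reconstruction", "tracking"]

-- ===== PORT A =====
def validate_stage_dependencies (stages_to_run : List String) : List String :=
  let validated : PySem.Set String := PySem.Set.ofList stages_to_run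
  let validated := if "tracking" ∈ validated then validated.add "reconstruction" else validated
  let validated := if "reconstruction" ∈ validated then validated.add "segmentation" else validated
  let validated := if "segmentation" ∈ validated then validated.add "extraction" else validated
  ALL_STAGES.filter (fun s => decide (s ∈ validated))

-- ===== PORT B =====
def validate_stage_dependencies_alt (stages_to_run : List String) : List String :=
  let idx : Int := stages_to_run.foldl
    (fun idx s =>
      if s ∈ ALL_STAGES then max idx (((PySem.List.index? ALL_STAGES s).getD 0 : Nat) : Int)
      else idx) (-1)
  PySem.List.slice ALL_STAGES none (some (idx + 1))

-- ===== PRECONDITION & SPEC =====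
def Spec_validate_stage_dependencies (stages_to_run : List String) (out : List String) : Prop := out = validate_stage_dependencies_alt stages_to_run
instance (stages_to_run : List String) (out : List String) : Decidable (Spec_validate_stage_dependencies stages_to_run out) := by unfold Spec_validate_stage_dependencies; infer_instance

-- ===== CLAIM (what is proved, stated in full; the proofs are below) =====
def Claim_equal_validate_stage_dependencies : Prop := ∀ (stages_to_run : List String), Dom_validate_stage_dependencies stages_to_run → Spec_validate_stage_dependencies stages_to_run (validate_stage_dependencies stages_to_run)

-- ===== LEMMAS AND PROOFS =====

-- the value B's fold computes, as a function of which stages are requested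
def tgt (l : List String) : Int :=
  if "tracking" ∈ l then 3 else if "reconstruction" ∈ l then 2
  else if "segmentation" ∈ l then 1 else if "extraction" ∈ l then 0 else -1

-- the ALL_STAGES index of one stage (-1 for an unknown stage)
def stageIdx (s : String) : Int :=
  if s = "tracking" then 3 else if s = "reconstruction" then 2
  else if s = "segmentation" then 1 else if s = "extraction" then 0 else -1

lemma tgt_ge (l : List String) : -1 ≤ tgt l := by
  unfold tgt; split_ifs <;> omega

lemma tgt_cons (s : String) (t : List String) : tgt (s :: t) = max (stageIdx s) (tgt t) := by
  unfold tgt stageIdx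
  by_cases h3 : s = "tracking" <;> by_cases h2 : s = "reconstruction" <;>
    by_cases h1 : s = "segmentation" <;> by_cases h0 : s = "extraction" <;>
      simp_all [List.mem_cons] <;> split_ifs <;> simp_all

lemma foldl_tgt (l : List String) : ∀ acc : Int, -1 ≤ acc →
    l.foldl (fun idx s =>
      if s ∈ ALL_STAGES then max idx (((PySem.List.index? ALL_STAGES s).getD 0 : Nat) : Int)
      else idx) acc = max acc (tgt l) := by
  induction l with
  | nil => intro acc h; unfold tgt; simp; omega
  | cons s t ih =>
    intro acc h
    simp only [List.foldl_cons]
    by_cases h3 : s = "tracking"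
    · subst h3
      have hstep : (if ("tracking" : String) ∈ ALL_STAGES then
          max acc (((PySem.List.index? ALL_STAGES "tracking").getD 0 : Nat) : Int) else acc) = max acc 3 := rfl
      rw [hstep, ih _ (by omega), tgt_cons]
      have hv : stageIdx "tracking" = 3 := rfl
      rw [hv]; omega
    · by_cases h2 : s = "reconstruction"
      · subst h2
        have hstep : (if ("reconstruction" : String) ∈ ALL_STAGES then
            max acc (((PySem.List.index? ALL_STAGES "reconstruction").getD 0 : Nat) : Int) else acc) = max acc 2 := rfl
        rw [hstep, ih _ (by omega), tgt_cons]
        have hv : stageIdx "reconstruction" = 2 := rfl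
        rw [hv]; omega
      · by_cases h1 : s = "segmentation"
        · subst h1
          have hstep : (if ("segmentation" : String) ∈ ALL_STAGES then
              max acc (((PySem.List.index? ALL_STAGES "segmentation").getD 0 : Nat) : Int) else acc) = max acc 1 := rfl
          rw [hstep, ih _ (by omega), tgt_cons]
          have hv : stageIdx "segmentation" = 1 := rfl
          rw [hv]; omega
        · by_cases h0 : s = "extraction"
          · subst h0
            have hstep : (if ("extraction" : String) ∈ ALL_STAGES then
                max acc (((PySem.List.index? ALL_STAGES "extraction").getD 0 : Nat) : Int) else acc) = max acc 0 := rfl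
            rw [hstep, ih _ (by omega), tgt_cons]
            have hv : stageIdx "extraction" = 0 := rfl
            rw [hv]; omega
          · have hnot : s ∉ ALL_STAGES := by simp [ALL_STAGES, h0, h1, h2, h3]
            rw [if_neg hnot, ih _ h, tgt_cons]
            have hv : stageIdx s = -1 := by unfold stageIdx; simp [h3, h2, h1, h0]
            have := tgt_ge t
            rw [hv]; omega

-- ===== VERDICT (by name: the statement is the Claim_ definition above) =====
theorem validate_stage_dependencies_spec : Claim_equal_validate_stage_dependencies := by
  intro l _
  unfold Spec_validate_stage_dependencies validate_stage_dependencies validate_stage_dependencies_alt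
  rw [foldl_tgt l (-1) (by omega)]
  have hmax : max (-1 : Int) (tgt l) = tgt l := by have := tgt_ge l; omega
  rw [hmax]
  by_cases h3 : "tracking" ∈ l <;> by_cases h2 : "reconstruction" ∈ l <;>
    by_cases h1 : "segmentation" ∈ l <;> by_cases h0 : "extraction" ∈ l <;>
      simp [tgt, h0, h1, h2, h3, ALL_STAGES, PySem.Set.mem_ofList,
        PySem.List.slice_to, PySem.Set.add, PySem.Set.contains]
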